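-- pv_equiv track=rewrite | github.com/nathandjanica/test | patterns.py | apply_pattern_line
-- ===== SOURCE A (Python) =====
-- def get_neighbors(r, c, grid):
--     neighbors = []
--     for dr in [-1,0,1]:
--         for dc in [-1,0,1]:
--             if dr == 0 and dc == 0:
--                 continue
--             nr, nc = r+dr, c+dc
--             if 0 <= nr < len(grid) and 0 <= nc < len(grid[0]):
--                 neighbors.append((nr,nc))
--     return neighbors
--
-- def unknown_cells(grid, cells):
--     return [(r,c) for (r,c) in cells if grid[r][c] == '?']
--
-- def apply_pattern_line(grid, pattern, mines_indices, safe_indices):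
--     """
--     Scan grid rows and columns for a pattern of numbers (as strings),
--     and for each occurrence:
--       - mines_indices: positions in pattern (0-based) that correspond to mines
--       - safe_indices: positions in pattern that correspond to safe tiles.
--     Returns sets of mines and safe tiles (coordinates).
--     """
--     safe = set()
--     mines = set()
--     rows = len(grid)
--     cols = len(grid[0])
--     plen = len(pattern)
--
--     def check_line(line, r, c_start, vertical=False):
--         for i in range(len(line) - plen + 1):
--             window = line[i:i+plen]
--             if window == pattern:
--                 # For each mine position index, add unknown neighbors of tile at that position
--                 for mi in mines_indices:
--                     rr = r+i+mi if vertical else r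
--                     cc = c_start+i+mi if not vertical else c_start
--                     neighbors = get_neighbors(rr, cc, grid)
--                     for nr,nc in unknown_cells(grid, neighbors):
--                         mines.add((nr,nc))
--                 # For each safe position index, add unknown neighbors of tile at that position
--                 for si in safe_indices:
--                     rr = r+i+si if vertical else r
--                     cc = c_start+i+si if not vertical else c_start
--                     neighbors = get_neighbors(rr, cc, grid)
--                     for nr,nc in unknown_cells(grid, neighbors):
--                         safe.add((nr,nc))
--
--     # Check rows
--     for r in range(rows):
--         line = [grid[r][c] for c in range(cols)]
--         check_line(line, r, 0, vertical=False)
--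
--     # Check columns
--     for c in range(cols):
--         line = [grid[r][c] for r in range(rows)]
--         check_line(line, 0, c, vertical=True)
--
--     return safe, mines
-- ===== SOURCE B (Python) =====
-- def apply_pattern_line(grid, pattern, mines_indices, safe_indices):
--     rows, cols, plen = len(grid), len(grid[0]), len(pattern)
--
--     def occurrences(line):
--         # inverted index: value -> list of positions; a match start i is a
--         # position of pattern[0] that survives intersection with every
--         # shifted position-set of pattern[k]; no window is ever compared.
--         n = len(line)
--         index = {}
--         for j, v in enumerate(line):
--             index.setdefault(v, []).append(j)
--         if plen == 0:
--             occ = set(range(n + 1))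
--         else:
--             occ = set(index.get(pattern[0], []))
--             for k in range(1, plen):
--                 occ &= {j - k for j in index.get(pattern[k], [])}
--         return sorted(i for i in occ if 0 <= i <= n - plen)
--
--     def unknown_near(rr, cc):
--         return [(nr, nc)
--                 for nr in range(max(0, rr - 1), min(rows, rr + 2))
--                 for nc in range(max(0, cc - 1), min(cols, cc + 2))
--                 if (nr, nc) != (rr, cc) and grid[nr][nc] == '?']
--
--     safe, mines = set(), set()
--     for r in range(rows):
--         for i in occurrences([grid[r][c] for c in range(cols)]):
--             for mi in mines_indices:
--                 mines.update(unknown_near(r, i + mi))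
--             for si in safe_indices:
--                 safe.update(unknown_near(r, i + si))
--     for c in range(cols):
--         for i in occurrences([grid[r][c] for r in range(rows)]):
--             for mi in mines_indices:
--                 mines.update(unknown_near(i + mi, c))
--             for si in safe_indices:
--                 safe.update(unknown_near(i + si, c))
--     return safe, mines
-- ===== Notes on version B (the rewrite author's own statement) =====
-- stated objective: alternative
-- what changed: Pattern matches are no longer found by comparing each sliding window with the pattern: B builds an inverted index (cell value -> list of positions) per line once, starts from the position set of pattern[0] and intersects it with the shifted position sets of every other pattern element, so no window comparison exists anywhere; the surviving starts are sorted and expanded to unknown neighbours via clamped index ranges.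
import Mathlib
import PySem

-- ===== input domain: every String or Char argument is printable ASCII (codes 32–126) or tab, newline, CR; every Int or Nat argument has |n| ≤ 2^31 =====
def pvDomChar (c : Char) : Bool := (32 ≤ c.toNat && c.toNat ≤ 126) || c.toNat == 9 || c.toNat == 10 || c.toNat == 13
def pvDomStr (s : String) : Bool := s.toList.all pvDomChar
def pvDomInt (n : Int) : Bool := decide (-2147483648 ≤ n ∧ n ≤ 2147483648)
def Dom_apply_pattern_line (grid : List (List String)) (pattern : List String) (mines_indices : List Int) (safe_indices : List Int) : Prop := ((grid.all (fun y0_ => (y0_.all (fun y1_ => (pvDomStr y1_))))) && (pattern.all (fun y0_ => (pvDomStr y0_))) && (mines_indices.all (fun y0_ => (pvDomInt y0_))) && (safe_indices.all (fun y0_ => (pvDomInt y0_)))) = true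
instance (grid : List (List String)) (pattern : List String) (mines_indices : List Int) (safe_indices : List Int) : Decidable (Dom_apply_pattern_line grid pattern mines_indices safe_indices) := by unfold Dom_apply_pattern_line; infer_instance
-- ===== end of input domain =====

-- B finds pattern occurrences with an inverted index (value -> positions) and shifted
-- position-set intersections instead of A's sliding-window comparisons; objective:
-- alternative algorithm, same worst-case cost.

-- ===== PORT A =====
def get_neighbors (r c : Int) (grid : List (List String)) : List (Int × Int) :=
  ([-1, 0, 1] : List Int).foldl (fun acc dr =>
    ([-1, 0, 1] : List Int).foldl (fun acc dc =>
      if dr = 0 ∧ dc = 0 then acc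
      else if 0 ≤ r + dr ∧ r + dr < (grid.length : Int) ∧ 0 ≤ c + dc ∧
              c + dc < ((PySem.List.pyGetD grid 0 []).length : Int)
      then acc ++ [(r + dr, c + dc)] else acc) acc) []

def unknown_cells (grid : List (List String)) (cells : List (Int × Int)) : List (Int × Int) :=
  cells.filter (fun p => PySem.List.pyGetD (PySem.List.pyGetD grid p.1 []) p.2 "" == "?")

-- the nested function check_line of A, with the two mutated sets threaded as state (safe, mines)
def check_line (grid : List (List String)) (pattern : List String)
    (mines_indices safe_indices : List Int) (line : List String) (r c_start : Int)
    (vertical : Bool) (st : PySem.Set (Int × Int) × PySem.Set (Int × Int)) :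
    PySem.Set (Int × Int) × PySem.Set (Int × Int) :=
  (PySem.List.pyRange 0 ((line.length : Int) - (pattern.length : Int) + 1) 1).foldl (fun st i =>
    let window := PySem.List.slice line (some i) (some (i + (pattern.length : Int)))
    if window = pattern then
      let mines := mines_indices.foldl (fun m mi =>
        let rr := if vertical then r + i + mi else r
        let cc := if !vertical then c_start + i + mi else c_start
        (unknown_cells grid (get_neighbors rr cc grid)).foldl (fun m p => PySem.Set.add m p) m) st.2
      let safe := safe_indices.foldl (fun s si =>
        let rr := if vertical then r + i + si else r
        let cc := if !vertical then c_start + i + si else c_start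
        (unknown_cells grid (get_neighbors rr cc grid)).foldl (fun s p => PySem.Set.add s p) s) st.1
      (safe, mines)
    else st) st

def apply_pattern_line (grid : List (List String)) (pattern : List String)
    (mines_indices : List Int) (safe_indices : List Int) :
    (List (Int × Int)) × (List (Int × Int)) :=
  let rows : Int := (grid.length : Int)
  let cols : Int := ((PySem.List.pyGetD grid 0 []).length : Int)
  let st0 : PySem.Set (Int × Int) × PySem.Set (Int × Int) := (PySem.Set.empty, PySem.Set.empty)
  let st1 := (PySem.List.pyRange 0 rows 1).foldl (fun st r =>
    check_line grid pattern mines_indices safe_indices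
      ((PySem.List.pyRange 0 cols 1).map (fun c => PySem.List.pyGetD (PySem.List.pyGetD grid r []) c ""))
      r 0 false st) st0
  let st2 := (PySem.List.pyRange 0 cols 1).foldl (fun st c =>
    check_line grid pattern mines_indices safe_indices
      ((PySem.List.pyRange 0 rows 1).map (fun r => PySem.List.pyGetD (PySem.List.pyGetD grid r []) c ""))
      0 c true st) st1
  st2

-- ===== PORT B =====
-- inverted index of a line: cell value -> list of its positions (in order)
def alt_index (line : List String) : PySem.Dict String (List Int) :=
  (PySem.List.enumerate line).foldl
    (fun d p => PySem.Dict.modify d p.2 [] (fun l => l ++ [p.1])) PySem.Dict.empty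

-- match starts: positions of pattern[0] intersected with shifted positions of every pattern[k]
def alt_occurrences (pattern line : List String) : List Int :=
  let n : Int := (line.length : Int)
  let plen : Int := (pattern.length : Int)
  let index := alt_index line
  let occ : PySem.Set Int :=
    if pattern.length = 0 then PySem.Set.ofList (PySem.List.pyRange 0 (n + 1) 1)
    else (PySem.List.pyRange 1 plen 1).foldl
      (fun occ k => PySem.Set.inter occ (PySem.Set.ofList
        ((PySem.Dict.getD index (PySem.List.pyGetD pattern k "") []).map (fun j => j - k))))
      (PySem.Set.ofList (PySem.Dict.getD index (PySem.List.pyGetD pattern 0 "") []))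
  PySem.List.sorted (occ.filter (fun i => decide (0 ≤ i ∧ i ≤ n - plen))) (fun x => x) false

def alt_unknown_near (grid : List (List String)) (rows cols rr cc : Int) : List (Int × Int) :=
  (PySem.List.pyRange (max 0 (rr - 1)) (min rows (rr + 2)) 1).flatMap (fun nr =>
    ((PySem.List.pyRange (max 0 (cc - 1)) (min cols (cc + 2)) 1).filter (fun nc =>
      decide (¬(nr = rr ∧ nc = cc)) &&
        (PySem.List.pyGetD (PySem.List.pyGetD grid nr []) nc "" == "?"))).map (fun nc => (nr, nc)))

def apply_pattern_line_alt (grid : List (List String)) (pattern : List String)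
    (mines_indices : List Int) (safe_indices : List Int) :
    (List (Int × Int)) × (List (Int × Int)) :=
  let rows : Int := (grid.length : Int)
  let cols : Int := ((PySem.List.pyGetD grid 0 []).length : Int)
  let st0 : PySem.Set (Int × Int) × PySem.Set (Int × Int) := (PySem.Set.empty, PySem.Set.empty)
  let st1 := (PySem.List.pyRange 0 rows 1).foldl (fun st r =>
    (alt_occurrences pattern ((PySem.List.pyRange 0 cols 1).map
        (fun c => PySem.List.pyGetD (PySem.List.pyGetD grid r []) c ""))).foldl (fun st i =>
      let mines := mines_indices.foldl (fun m mi =>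
        PySem.Set.update m (alt_unknown_near grid rows cols r (i + mi))) st.2
      let safe := safe_indices.foldl (fun s si =>
        PySem.Set.update s (alt_unknown_near grid rows cols r (i + si))) st.1
      (safe, mines)) st) st0
  let st2 := (PySem.List.pyRange 0 cols 1).foldl (fun st c =>
    (alt_occurrences pattern ((PySem.List.pyRange 0 rows 1).map
        (fun r => PySem.List.pyGetD (PySem.List.pyGetD grid r []) c ""))).foldl (fun st i =>
      let mines := mines_indices.foldl (fun m mi =>
        PySem.Set.update m (alt_unknown_near grid rows cols (i + mi) c)) st.2
      let safe := safe_indices.foldl (fun s si =>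
        PySem.Set.update s (alt_unknown_near grid rows cols (i + si) c)) st.1
      (safe, mines)) st) st1
  st2

-- ===== PRECONDITION & SPEC =====
-- Pre_ excludes exactly the inputs where the Python A raises IndexError: the empty grid
-- (len(grid[0]) fails) and grids with a row shorter than the first row (column extraction fails).
def Pre_apply_pattern_line (grid : List (List String)) (pattern : List String) (mines_indices : List Int) (safe_indices : List Int) : Prop :=
  grid ≠ [] ∧ ∀ row ∈ grid, (grid.headI).length ≤ row.length
instance (grid : List (List String)) (pattern : List String) (mines_indices : List Int) (safe_indices : List Int) : Decidable (Pre_apply_pattern_line grid pattern mines_indices safe_indices) := by unfold Pre_apply_pattern_line; infer_instance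
def pvWitness_apply_pattern_line : List (List String) × List String × List Int × List Int :=
  ([["1", "?"], ["?", "2"]], ["1"], [0], [0])

def Spec_apply_pattern_line (grid : List (List String)) (pattern : List String) (mines_indices : List Int) (safe_indices : List Int) (out : (List (Int × Int)) × (List (Int × Int))) : Prop := out = apply_pattern_line_alt grid pattern mines_indices safe_indices
instance (grid : List (List String)) (pattern : List String) (mines_indices : List Int) (safe_indices : List Int) (out : (List (Int × Int)) × (List (Int × Int))) : Decidable (Spec_apply_pattern_line grid pattern mines_indices safe_indices out) := by unfold Spec_apply_pattern_line; infer_instance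

-- ===== CLAIM (what is proved, stated in full; the proofs are below) =====
def Claim_equal_apply_pattern_line : Prop := ∀ (grid : List (List String)) (pattern : List String) (mines_indices : List Int) (safe_indices : List Int), Dom_apply_pattern_line grid pattern mines_indices safe_indices → Pre_apply_pattern_line grid pattern mines_indices safe_indices → Spec_apply_pattern_line grid pattern mines_indices safe_indices (apply_pattern_line grid pattern mines_indices safe_indices)

-- ===== LEMMAS AND PROOFS =====

-- a clamped index range is the bounds-filter of the three candidate indices
lemma pv_range_clamp (a R : Int) :
    PySem.List.pyRange (max 0 (a - 1)) (min R (a + 2)) 1 =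
      ([a - 1, a, a + 1]).filter (fun x => decide (0 ≤ x ∧ x < R)) := by
  apply List.Perm.eq_of_pairwise (le := (· < ·))
  · intro x y _ _ h1 h2; omega
  · exact PySem.List.pairwise_lt_pyRange_one _ _
  · apply List.Pairwise.filter
    simp [List.pairwise_cons]
  · rw [List.perm_ext_iff_of_nodup (PySem.List.nodup_pyRange_one _ _)]
    · intro x
      simp [PySem.List.mem_pyRange_one, List.mem_filter]
      omega
    · apply List.Nodup.filter
      simp [List.nodup_cons]
      omega

lemma pv_filter_flatMap {α β : Type} (l : List α) (p : α → Bool) (g : α → List β) :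
    (l.filter p).flatMap g = l.flatMap (fun x => if p x then g x else []) := by
  induction l with
  | nil => simp
  | cons x t ih => by_cases h : p x <;> simp [h, ih]

-- A's filtered neighbourhood equals B's clamped-range neighbourhood, for every centre
lemma pv_neighbors_eq (grid : List (List String)) (rr cc : Int) :
    unknown_cells grid (get_neighbors rr cc grid) =
      alt_unknown_near grid (grid.length : Int) ((PySem.List.pyGetD grid 0 []).length : Int) rr cc := by
  set rows : Int := (grid.length : Int) with hrows
  set cols : Int := ((PySem.List.pyGetD grid 0 []).length : Int) with hcols
  set isQ : Int → Int → Bool :=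
    fun nr nc => (PySem.List.pyGetD (PySem.List.pyGetD grid nr []) nc "" == "?") with hisQ
  have inner : ∀ (dr : Int) (acc : List (Int × Int)),
      ([-1,0,1] : List Int).foldl (fun acc dc =>
        if dr = 0 ∧ dc = 0 then acc
        else if 0 ≤ rr + dr ∧ rr + dr < rows ∧ 0 ≤ cc + dc ∧ cc + dc < cols then
          acc ++ [(rr + dr, cc + dc)] else acc) acc =
      acc ++ (([-1,0,1] : List Int).filter (fun dc =>
          decide (¬(dr = 0 ∧ dc = 0)) &&
            decide (0 ≤ rr + dr ∧ rr + dr < rows ∧ 0 ≤ cc + dc ∧ cc + dc < cols))).map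
        (fun dc => (rr + dr, cc + dc)) := by
    intro dr acc
    rw [← PySem.List.foldl_append_if]
    apply PySem.List.foldl_congr_mem
    intro a x _
    by_cases hs : dr = 0 ∧ x = 0 <;>
      by_cases hb : 0 ≤ rr + dr ∧ rr + dr < rows ∧ 0 ≤ cc + x ∧ cc + x < cols <;>
      simp [hs, hb]
  have hA : get_neighbors rr cc grid =
      ([-1,0,1] : List Int).flatMap (fun dr =>
        (([-1,0,1] : List Int).filter (fun dc =>
            decide (¬(dr = 0 ∧ dc = 0)) &&
              decide (0 ≤ rr + dr ∧ rr + dr < rows ∧ 0 ≤ cc + dc ∧ cc + dc < cols))).map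
          (fun dc => (rr + dr, cc + dc))) := by
    unfold get_neighbors
    rw [PySem.List.foldl_congr_mem _ _ (fun acc dr => acc ++ _) _ (fun acc dr _ => inner dr acc)]
    rw [PySem.List.foldl_append_eq_flatMap]
    simp
  have hA2 : unknown_cells grid (get_neighbors rr cc grid) =
      ([-1,0,1] : List Int).flatMap (fun dr =>
        (([-1,0,1] : List Int).filter (fun dc =>
            isQ (rr + dr) (cc + dc) &&
              (decide (¬(dr = 0 ∧ dc = 0)) &&
                decide (0 ≤ rr + dr ∧ rr + dr < rows ∧ 0 ≤ cc + dc ∧ cc + dc < cols)))).map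
          (fun dc => (rr + dr, cc + dc))) := by
    rw [unknown_cells, hA, List.filter_flatMap]
    refine List.flatMap_congr (fun dr _ => ?_)
    rw [List.filter_map, List.filter_filter]
    rfl
  have strip : ∀ (dr : Int),
      (([-1,0,1] : List Int).filter (fun dc =>
          isQ (rr + dr) (cc + dc) &&
            (decide (¬(dr = 0 ∧ dc = 0)) &&
              decide (0 ≤ rr + dr ∧ rr + dr < rows ∧ 0 ≤ cc + dc ∧ cc + dc < cols)))).map
        (fun dc => (rr + dr, cc + dc)) =
      if decide (0 ≤ rr + dr ∧ rr + dr < rows) = true then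
        (([cc - 1, cc, cc + 1] : List Int).filter (fun nc =>
            (decide (¬(rr + dr = rr ∧ nc = cc)) && isQ (rr + dr) nc) &&
              decide (0 ≤ nc ∧ nc < cols))).map (fun nc => (rr + dr, nc))
      else [] := by
    intro dr
    by_cases hr : 0 ≤ rr + dr ∧ rr + dr < rows
    · rw [if_pos (by simp [hr])]
      have hre : ([cc - 1, cc, cc + 1] : List Int) = ([-1,0,1] : List Int).map (fun dc => cc + dc) := by
        simp
        omega
      rw [hre, List.filter_map, List.map_map]
      refine congrArg _ (List.filter_congr (fun dc _ => ?_))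
      rw [Bool.eq_iff_iff]
      simp [Function.comp, hr.1, hr.2]
      tauto
    · rw [if_neg (by simp [hr])]
      rw [List.filter_eq_nil_iff.mpr, List.map_nil]
      intro dc _ h
      simp only [Bool.and_eq_true, decide_eq_true_eq] at h
      exact hr ⟨h.2.2.1, h.2.2.2.1⟩
  have hB : alt_unknown_near grid rows cols rr cc =
      ([rr - 1, rr, rr + 1] : List Int).flatMap (fun nr =>
        if decide (0 ≤ nr ∧ nr < rows) = true then
          (([cc - 1, cc, cc + 1] : List Int).filter (fun nc =>
              (decide (¬(nr = rr ∧ nc = cc)) && isQ nr nc) && decide (0 ≤ nc ∧ nc < cols))).map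
            (fun nc => (nr, nc))
        else []) := by
    rw [alt_unknown_near, pv_range_clamp rr rows, pv_range_clamp cc cols, pv_filter_flatMap]
    refine List.flatMap_congr (fun nr _ => ?_)
    rw [List.filter_filter]
  rw [hA2, hB]
  simp only [strip]
  have m1 : rr + (-1 : Int) = rr - 1 := by ring
  have m0 : rr + (0 : Int) = rr := by ring
  simp [m1, m0]

-- folding Set.add over a list is Set.update
lemma pv_foldl_add (l : List (Int × Int)) (s : PySem.Set (Int × Int)) :
    l.foldl (fun s p => PySem.Set.add s p) s = PySem.Set.update s l := rfl

lemma pv_foldl_update {ε : Type} (l : List ε) (g : ε → List (Int × Int)) (s : PySem.Set (Int × Int)) :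
    l.foldl (fun m x => PySem.Set.update m (g x)) s = PySem.Set.update s (l.flatMap g) := by
  induction l generalizing s with
  | nil => simp [PySem.Set.update]
  | cons x t ih =>
    simp only [List.foldl_cons]
    rw [ih]
    simp [PySem.Set.update, List.flatMap_cons, List.foldl_append]

lemma pv_foldl_pair_update {ε : Type} (l : List ε) (u v : ε → List (Int × Int))
    (s1 s2 : PySem.Set (Int × Int)) :
    l.foldl (fun st e => (PySem.Set.update st.1 (u e), PySem.Set.update st.2 (v e))) (s1, s2) =
      (PySem.Set.update s1 (l.flatMap u), PySem.Set.update s2 (l.flatMap v)) := by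
  induction l generalizing s1 s2 with
  | nil => simp [PySem.Set.update]
  | cons x t ih =>
    simp only [List.foldl_cons]
    rw [ih]
    simp [PySem.Set.update, List.flatMap_cons, List.foldl_append]

lemma pv_update_update (s : PySem.Set (Int × Int)) (a b : List (Int × Int)) :
    PySem.Set.update (PySem.Set.update s a) b = PySem.Set.update s (a ++ b) :=
  (List.foldl_append).symm

-- check_line as one simultaneous pair update
lemma pv_check_line_eq (grid : List (List String)) (pattern : List String)
    (mines_indices safe_indices : List Int) (line : List String) (r c : Int) (v : Bool)
    (st : PySem.Set (Int × Int) × PySem.Set (Int × Int)) :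
    check_line grid pattern mines_indices safe_indices line r c v st =
      (PySem.Set.update st.1
        ((PySem.List.pyRange 0 ((line.length : Int) - (pattern.length : Int) + 1) 1).flatMap (fun i =>
          if PySem.List.slice line (some i) (some (i + (pattern.length : Int))) = pattern then
            safe_indices.flatMap (fun p => unknown_cells grid
              (get_neighbors (if v then r + i + p else r) (if !v then c + i + p else c) grid))
          else [])),
       PySem.Set.update st.2
        ((PySem.List.pyRange 0 ((line.length : Int) - (pattern.length : Int) + 1) 1).flatMap (fun i =>
          if PySem.List.slice line (some i) (some (i + (pattern.length : Int))) = pattern then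
            mines_indices.flatMap (fun p => unknown_cells grid
              (get_neighbors (if v then r + i + p else r) (if !v then c + i + p else c) grid))
          else []))) := by
  obtain ⟨s1, s2⟩ := st
  unfold check_line
  rw [PySem.List.foldl_congr_mem _ _ (fun st i =>
      (PySem.Set.update st.1 (if PySem.List.slice line (some i) (some (i + (pattern.length : Int))) = pattern then
          safe_indices.flatMap (fun p => unknown_cells grid
            (get_neighbors (if v then r + i + p else r) (if !v then c + i + p else c) grid))
        else []),
       PySem.Set.update st.2 (if PySem.List.slice line (some i) (some (i + (pattern.length : Int))) = pattern then
          mines_indices.flatMap (fun p => unknown_cells grid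
            (get_neighbors (if v then r + i + p else r) (if !v then c + i + p else c) grid))
        else []))) _ ?_]
  · rw [pv_foldl_pair_update]
  · intro acc i _
    by_cases hw : PySem.List.slice line (some i) (some (i + (pattern.length : Int))) = pattern
    · simp only [if_pos hw]
      simp only [pv_foldl_add, pv_foldl_update]
    · simp only [if_neg hw]
      simp [PySem.Set.update]

-- a window of a generated line, as a map over the pattern positions
lemma pv_slice_window (f : Int → String) (N pl : Nat) (i : Int) (h0 : 0 ≤ i)
    (h1 : i + (pl : Int) ≤ (N : Int)) :
    PySem.List.slice ((PySem.List.pyRange 0 (N : Int) 1).map f) (some i) (some (i + (pl : Int))) =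
      (PySem.List.pyRange 0 (pl : Int) 1).map (fun k => f (i + k)) := by
  obtain ⟨iN, rfl⟩ : ∃ iN : Nat, i = (iN : Int) := ⟨i.toNat, (Int.toNat_of_nonneg h0).symm⟩
  have hc : ((iN : Int) + (pl : Int)) = ((iN + pl : Nat) : Int) := by push_cast; ring
  rw [hc, PySem.List.slice_natCast]
  apply List.ext_getElem
  · simp [PySem.List.length_pyRange_one]
    omega
  · intro k hk1 hk2
    have hkpl : k < pl := by
      simp [PySem.List.length_pyRange_one] at hk1
      omega
    have hik : iN + k < ((PySem.List.pyRange 0 (N : Int) 1).map f).length := by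
      simp [PySem.List.length_pyRange_one]
      omega
    rw [List.getElem_take, List.getElem_drop, List.getElem_map, List.getElem_map,
      PySem.List.getElem_pyRange_one, PySem.List.getElem_pyRange_one]
    congr 1
    push_cast
    ring

-- window equality is the positionwise check
lemma pv_match_iff (f : Int → String) (pattern : List String) (N : Nat) (i : Int) (h0 : 0 ≤ i)
    (h1 : i + (pattern.length : Int) ≤ (N : Int)) :
    (PySem.List.slice ((PySem.List.pyRange 0 (N : Int) 1).map f) (some i)
        (some (i + (pattern.length : Int))) = pattern) ↔
      ((PySem.List.pyRange 0 (pattern.length : Int) 1).all (fun k =>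
        f (i + k) == PySem.List.pyGetD pattern k "") = true) := by
  rw [pv_slice_window f N pattern.length i h0 h1]
  have pat_eq : pattern = (PySem.List.pyRange 0 (pattern.length : Int) 1).map
      (fun j => PySem.List.pyGetD pattern j "") := (PySem.List.map_pyGetD_pyRange_zero' pattern "").symm
  conv_lhs => rw [eq_comm]; lhs; rw [pat_eq]
  rw [eq_comm]
  rw [List.map_inj_left, List.all_eq_true]
  constructor
  · intro h k hk
    simpa using h k hk
  · intro h k hk
    simpa using h k hk

lemma pv_index_getD (line : List String) (v : String) :
    PySem.Dict.getD (alt_index line) v [] =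
      ((PySem.List.enumerate line).filter (fun p => p.2 == v)).map (·.1) := by
  have hfold : alt_index line =
      ((PySem.List.enumerate line).map Prod.swap).foldl
        (fun d p => PySem.Dict.modify d p.1 [] (fun l => l ++ [p.2])) PySem.Dict.empty := by
    rw [List.foldl_map]; rfl
  rw [hfold, PySem.Dict.getD_foldl_modify_append, PySem.Dict.getD_empty]
  simp [List.filter_map, List.map_map]; rfl

lemma pv_mem_pos (line : List String) (v : String) (j : Int) :
    j ∈ PySem.Dict.getD (alt_index line) v [] ↔
      0 ≤ j ∧ j < (line.length : Int) ∧ PySem.List.pyGetD line j "" = v := by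
  rw [pv_index_getD]
  simp only [List.mem_map, List.mem_filter, PySem.List.mem_enumerate_iff, beq_iff_eq]
  constructor
  · rintro ⟨p, ⟨⟨k, hk, rfl⟩, hv⟩, hj⟩
    simp only at hv hj
    refine ⟨by omega, by omega, ?_⟩
    have h1 : j = ((k : Nat) : Int) := by omega
    rw [h1, PySem.List.pyGetD_natCast]
    simp [List.getD_eq_getElem?_getD, hk, hv]
  · rintro ⟨h0, hn, hv⟩
    lift j to Nat using h0 with k
    have hk : k < line.length := by exact_mod_cast hn
    refine ⟨_, ⟨⟨k, hk, rfl⟩, ?_⟩, by simp⟩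
    rw [PySem.List.pyGetD_natCast] at hv
    simpa [List.getD_eq_getElem?_getD, hk] using hv

lemma pv_foldl_inter_mem (l : List Int) (g : Int → List Int) (s0 : List Int) (x : Int) :
    x ∈ l.foldl (fun s k => PySem.Set.inter s (g k)) s0 ↔ x ∈ s0 ∧ ∀ k ∈ l, x ∈ g k := by
  induction l generalizing s0 with
  | nil => simp
  | cons a t ih =>
    simp only [List.foldl_cons, ih, PySem.Set.mem_inter, List.mem_cons]
    constructor
    · rintro ⟨⟨h1, h2⟩, h3⟩
      exact ⟨h1, fun k hk => hk.elim (fun he => he ▸ h2) (h3 k)⟩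
    · rintro ⟨h1, h2⟩
      exact ⟨⟨h1, h2 a (Or.inl rfl)⟩, fun k hk => h2 k (Or.inr hk)⟩

lemma pv_foldl_inter_nodup (l : List Int) (g : Int → List Int) (s0 : List Int) (h : s0.Nodup) :
    (l.foldl (fun s k => PySem.Set.inter s (g k)) s0).Nodup := by
  induction l generalizing s0 with
  | nil => exact h
  | cons a t ih => exact ih _ (PySem.Set.nodup_inter _ _ h)

-- the intersection chain holds i exactly when every pattern position matches at i
lemma pv_occ_mem (pattern line : List String) (h0 : pattern.length ≠ 0) (i : Int) :
    i ∈ (PySem.List.pyRange 1 (pattern.length : Int) 1).foldl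
      (fun occ k => PySem.Set.inter occ (PySem.Set.ofList
        ((PySem.Dict.getD (alt_index line) (PySem.List.pyGetD pattern k "") []).map (fun j => j - k))))
      (PySem.Set.ofList (PySem.Dict.getD (alt_index line) (PySem.List.pyGetD pattern 0 "") [])) ↔
    ∀ k ∈ PySem.List.pyRange 0 (pattern.length : Int) 1,
      0 ≤ i + k ∧ i + k < (line.length : Int) ∧
        PySem.List.pyGetD line (i + k) "" = PySem.List.pyGetD pattern k "" := by
  have hp1 : (1 : Int) ≤ (pattern.length : Int) := by
    have := Nat.pos_of_ne_zero h0
    exact_mod_cast this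
  rw [pv_foldl_inter_mem]
  simp only [PySem.Set.mem_ofList, List.mem_map, pv_mem_pos, PySem.List.mem_pyRange_one]
  constructor
  · rintro ⟨hk0, hrest⟩ k hk
    by_cases hke : k = 0
    · subst hke
      simpa using hk0
    · obtain ⟨j, ⟨hj0, hj1, hj2⟩, hji⟩ := hrest k ⟨by omega, hk.2⟩
      have hjik : j = i + k := by omega
      subst hjik
      exact ⟨by omega, by omega, hj2⟩
  · intro h
    refine ⟨?_, ?_⟩
    · have := h 0 ⟨le_refl 0, by omega⟩
      simpa using this
    · intro k hk
      obtain ⟨h1, h2, h3⟩ := h k ⟨by omega, by omega⟩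
      exact ⟨i + k, ⟨h1, h2, h3⟩, by ring⟩

-- window equality on an arbitrary line, elementwise
lemma pv_slice_iff (line pattern : List String) (i : Int) (h0 : 0 ≤ i)
    (h1 : i + (pattern.length : Int) ≤ (line.length : Int)) :
    (PySem.List.slice line (some i) (some (i + (pattern.length : Int))) = pattern) ↔
      ∀ k ∈ PySem.List.pyRange 0 (pattern.length : Int) 1,
        PySem.List.pyGetD line (i + k) "" = PySem.List.pyGetD pattern k "" := by
  have hline : line = (PySem.List.pyRange 0 ((line.length : Nat) : Int) 1).map
      (fun c => PySem.List.pyGetD line c "") := (PySem.List.map_pyGetD_pyRange_zero' line "").symm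
  conv_lhs => rw [hline]
  rw [pv_match_iff (fun c => PySem.List.pyGetD line c "") pattern line.length i h0 h1]
  rw [List.all_eq_true]
  constructor
  · intro h k hk
    simpa using h k hk
  · intro h k hk
    simpa using h k hk

-- B's occurrence list is A's list of matching window starts
lemma pv_occ_eq (pattern line : List String) :
    alt_occurrences pattern line =
      (PySem.List.pyRange 0 ((line.length : Int) - (pattern.length : Int) + 1) 1).filter
        (fun i => decide (PySem.List.slice line (some i) (some (i + (pattern.length : Int))) = pattern)) := by
  unfold alt_occurrences
  dsimp only
  by_cases h0 : pattern.length = 0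
  · rw [if_pos h0]
    apply PySem.List.sorted_eq_of_perm_of_pairwise_lt
    · rw [List.perm_ext_iff_of_nodup
        (List.Nodup.filter _ (PySem.List.nodup_pyRange_one _ _))
        (List.Nodup.filter _ (PySem.Set.nodup_ofList _))]
      intro i
      rw [List.mem_filter, List.mem_filter, PySem.List.mem_pyRange_one,
        PySem.Set.mem_ofList, PySem.List.mem_pyRange_one,
        decide_eq_true_eq, decide_eq_true_eq]
      have hpl : ((pattern.length : Nat) : Int) = 0 := by exact_mod_cast h0
      constructor
      · rintro ⟨⟨hb0, hb1⟩, _⟩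
        exact ⟨⟨by omega, by omega⟩, by omega⟩
      · rintro ⟨⟨hm0, hm1⟩, hb⟩
        refine ⟨⟨by omega, by omega⟩, ?_⟩
        rw [pv_slice_iff line pattern i (by omega) (by omega)]
        intro k hk
        rw [PySem.List.mem_pyRange_one] at hk
        omega
    · exact List.Pairwise.filter _ (PySem.List.pairwise_lt_pyRange_one _ _)
  · rw [if_neg h0]
    have hp1 : (1 : Int) ≤ (pattern.length : Int) := by
      have := Nat.pos_of_ne_zero h0
      exact_mod_cast this
    apply PySem.List.sorted_eq_of_perm_of_pairwise_lt
    · rw [List.perm_ext_iff_of_nodup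
        (List.Nodup.filter _ (PySem.List.nodup_pyRange_one _ _))
        (List.Nodup.filter _ (pv_foldl_inter_nodup _ _ _ (PySem.Set.nodup_ofList _)))]
      intro i
      rw [List.mem_filter, List.mem_filter, PySem.List.mem_pyRange_one,
        decide_eq_true_eq, decide_eq_true_eq, pv_occ_mem pattern line h0 i]
      constructor
      · rintro ⟨⟨hb0, hb1⟩, hs⟩
        rw [pv_slice_iff line pattern i (by omega) (by omega)] at hs
        refine ⟨?_, by omega⟩
        intro k hk
        have hk' := hk
        rw [PySem.List.mem_pyRange_one] at hk'
        exact ⟨by omega, by omega, hs k hk⟩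
      · rintro ⟨hall, hb0, hb1⟩
        have hi0 : 0 ≤ i := by
          have := hall 0 (by rw [PySem.List.mem_pyRange_one]; omega)
          omega
        have hin : i + (pattern.length : Int) ≤ (line.length : Int) := by
          have := hall ((pattern.length : Int) - 1) (by rw [PySem.List.mem_pyRange_one]; omega)
          omega
        refine ⟨⟨hi0, by omega⟩, ?_⟩
        rw [pv_slice_iff line pattern i hi0 hin]
        intro k hk
        exact (hall k hk).2.2
    · exact List.Pairwise.filter _ (PySem.List.pairwise_lt_pyRange_one _ _)

-- A's guarded window pass equals B's pass over the occurrence filter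
lemma pv_piece (I idx : List Int) (cond : Int → Prop) [instc : ∀ i, Decidable (cond i)]
    (Acell Bcell : Int → Int → List (Int × Int))
    (hc : ∀ i ∈ I, ∀ p ∈ idx, Acell i p = Bcell i p) :
    I.flatMap (fun i => if cond i then idx.flatMap (Acell i) else []) =
      (I.filter (fun i => decide (cond i))).flatMap (fun i => idx.flatMap (Bcell i)) := by
  rw [pv_filter_flatMap]
  refine List.flatMap_congr (fun i hi => ?_)
  simp only [decide_eq_true_eq]
  exact if_congr Iff.rfl (List.flatMap_congr (fun p hp => hc i hi p hp)) rfl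

-- B's per-line expansion loop as one simultaneous pair update
lemma pv_alt_pass (occ mines_indices safe_indices : List Int)
    (near : Int → Int → List (Int × Int)) (st : PySem.Set (Int × Int) × PySem.Set (Int × Int)) :
    occ.foldl (fun st i =>
      (safe_indices.foldl (fun s si => PySem.Set.update s (near i si)) st.1,
       mines_indices.foldl (fun m mi => PySem.Set.update m (near i mi)) st.2)) st =
      (PySem.Set.update st.1 (occ.flatMap (fun i => safe_indices.flatMap (fun si => near i si))),
       PySem.Set.update st.2 (occ.flatMap (fun i => mines_indices.flatMap (fun mi => near i mi)))) := by
  obtain ⟨s1, s2⟩ := st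
  rw [PySem.List.foldl_congr_mem _ _ (fun st i =>
      (PySem.Set.update st.1 (safe_indices.flatMap (fun si => near i si)),
       PySem.Set.update st.2 (mines_indices.flatMap (fun mi => near i mi)))) _
      (fun st i _ => by rw [pv_foldl_update, pv_foldl_update])]
  rw [pv_foldl_pair_update]

lemma pv_update_ofList (a b : List (Int × Int)) :
    PySem.Set.update (PySem.Set.ofList a) b = PySem.Set.ofList (a ++ b) := by
  rw [← PySem.Set.update_empty, pv_update_update, PySem.Set.update_empty]

theorem apply_pattern_line_spec : Claim_equal_apply_pattern_line := by
  intro grid pattern mines_indices safe_indices _ _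
  unfold Spec_apply_pattern_line apply_pattern_line apply_pattern_line_alt
  simp only [pv_check_line_eq, pv_alt_pass, Bool.not_true, Bool.not_false, Bool.false_eq_true,
    if_true, if_false, zero_add, pv_foldl_pair_update, PySem.Set.update_empty, pv_update_ofList]
  refine congrArg₂ Prod.mk (congrArg PySem.Set.ofList ?_) (congrArg PySem.Set.ofList ?_) <;>
  · congr 1
    · refine List.flatMap_congr (fun r hr => ?_)
      rw [pv_occ_eq]
      refine pv_piece _ _ _ _ _ ?_
      intro i _ p _
      exact pv_neighbors_eq grid r (i + p)
    · refine List.flatMap_congr (fun c hcm => ?_)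
      rw [pv_occ_eq]
      refine pv_piece _ _ _ _ _ ?_
      intro i _ p _
      exact pv_neighbors_eq grid (i + p) c
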